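/- GENERATED by mk_final_copies.py from the proof of the farm's unit `skip` (farm:skip.1: Proof.lean) as the
   re-elaboration sweep compiled it — do not edit. -/
import Asan.CheckWalk
import Vorbis.Spec.Units.skip

open X86 X86.User Asan Vorbis Vorbis.Spec

set_option maxRecDepth 4000
set_option maxHeartbeats 4000000

namespace Vorbis.Spec.skip

/-- A non-negative `int` argument: its low half is below `2^31` and is the argument's value. -/
theorem arg_nonneg (r : Word) (h : 0 ≤ argInt r) :
    (Word.part .w32 r).toNat < 2 ^ 31 ∧ argInt r = ((Word.part .w32 r).toNat : Int) := by
  rw [argInt_def] at h ⊢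
  rw [part32_toNat]
  have hc := sint32_cases (r.toNat % 2 ^ 32)
  omega

/-- `movsxd r13, esi` read as a signed 64-bit number (the left side of `cmp r13, rdx ; jle`). -/
theorem sext_toInt (x : BitVec 32) (h : x.toNat < 2 ^ 31) : (BitVec.signExtend 64 x).toInt = (x.toNat : Int) := by
  rw [BitVec.toInt_signExtend_of_le (by decide)]
  exact toInt_of_lt x h

/-- `stream_end - stream` (`sub rdx, rax`) read as a signed 64-bit number: the difference of the numbers (S3: no wrap). -/
theorem sub_toInt (e s : Nat) (hse : s ≤ e) (he : e < 2 ^ 63) :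
    (UInt64.ofNat e - UInt64.ofNat s).toBitVec.toInt = (e : Int) - (s : Int) := by
  rw [← UInt64.ofNat_sub hse]
  rw [BitVec.toInt_eq_toNat_cond]
  have e1 : (UInt64.ofNat (e - s)).toBitVec.toNat = e - s := by
    rw [UInt64.toNat_toBitVec, UInt64.toNat_ofNat']
    omega
  rw [e1]
  split <;> omega

/-- `stream + n` (`movsxd rbp, ebp ; add rbp, rax`) for a non-negative `n`: no wrap. -/
theorem add_n_toNat (x : BitVec 32) (s : Nat) (hx : x.toNat < 2 ^ 31) (hs : s < 2 ^ 63) :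
    (Word.ofBV (BitVec.signExtend 64 x) + UInt64.ofNat s).toNat = x.toNat + s := by
  rw [UInt64.toNat_add, toNat_sext32 x hx, UInt64.toNat_ofNat']
  omega

/-- `stream + (int) (stream_end - stream)` (`mov ebp, edx ; movsxd rbp, ebp ; add rbp, rax`): the truncation is exact, the sum
is `stream_end`. -/
theorem add_rest_toNat (e s : Nat) (hse : s ≤ e) (hd : e - s ≤ 0x1FF000) (he : e < 2 ^ 63) :
    (Word.ofBV (BitVec.signExtend 64 (Word.part .w32 (UInt64.ofNat e - UInt64.ofNat s))) + UInt64.ofNat s).toNat = e := by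
  have hp : (Word.part .w32 (UInt64.ofNat e - UInt64.ofNat s)).toNat = e - s := by
    rw [part32_toNat, ← UInt64.ofNat_sub hse, UInt64.toNat_ofNat']
    omega
  rw [UInt64.toNat_add, toNat_sext32 _ (by omega), hp, UInt64.toNat_ofNat']
  omega

/-- **The memory after skip's stores**: everything of `*f` above `stream` reads the same except `eof`, the new `stream` is `s`
with `stream ≤ s ≤ stream_end`. `Bits` holds again, μ has not increased, `stream_end` is what it was. -/
theorem reader_after {Blk : Block → Prop} {len : Nat} {mem mem' : Mem} {f : Nat} (h : Bits Blk len mem f)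
    (hE1 : Mem.EqOn (f + 56) (f + 136) mem mem') (hE2 : Mem.EqOn (f + 140) (f + 1808) mem mem') (s : Nat)
    (es : stb_vorbis.stream mem' f = s) (h1 : stb_vorbis.stream mem f ≤ s) (h2 : s ≤ stb_vorbis.stream_end mem f) :
    ReaderPost Blk len mem mem' f := by
  have hr := h.OBR
  simp only [voff] at hr
  have e1 : stb_vorbis.stream_start mem' f = stb_vorbis.stream_start mem f := by
    simp only [vacc, voff]
    exact hE1.u64 _ (by omega) (by omega) (by omega)
  have e2 : stb_vorbis.stream_end mem' f = stb_vorbis.stream_end mem f := by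
    simp only [vacc, voff]
    exact hE1.u64 _ (by omega) (by omega) (by omega)
  have e4 : stb_vorbis.segment_count mem' f = stb_vorbis.segment_count mem f := by
    simp only [vacc, voff]
    exact hE2.i32 _ (by omega) (by omega) (by omega)
  have e5 : stb_vorbis.next_seg mem' f = stb_vorbis.next_seg mem f := by
    simp only [vacc, voff]
    exact hE2.i32 _ (by omega) (by omega) (by omega)
  have e6 : stb_vorbis.valid_bits mem' f = stb_vorbis.valid_bits mem f := by
    simp only [vacc, voff]
    exact hE2.i32 _ (by omega) (by omega) (by omega)
  have e7 : stb_vorbis.bytes_in_seg mem' f = stb_vorbis.bytes_in_seg mem f := by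
    simp only [vacc, voff]
    exact hE2.u8 _ (by omega) (by omega) (by omega)
  have hS3 := h.S3
  constructor
  · apply h.update e1 e2
    · rw [es]
      exact ⟨by omega, h2⟩
    · rw [e4]
      exact h.N1
    · rw [e4, e5]
      exact h.N2
    · rw [e6]
      exact h.V1
  · rw [mu_def, mu_def, es, e2, e4, e5, e7]
    exact muOf_le_of_stream _ _ _ _ _ _ h1

/-- `stream_end` through skip's stores. -/
theorem stream_end_after {Blk : Block → Prop} {len : Nat} {mem mem' : Mem} {f : Nat} (h : Bits Blk len mem f)
    (hE1 : Mem.EqOn (f + 56) (f + 136) mem mem') : stb_vorbis.stream_end mem' f = stb_vorbis.stream_end mem f := by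
  have hr := h.OBR
  simp only [voff] at hr
  simp only [vacc, voff]
  exact hE1.u64 _ (by omega) (by omega) (by omega)

/-- The `eof` field read back after `mov DWORD PTR [rbx+0x88], 1`. -/
theorem eof_of_read {mem : Mem} {f : Nat} (h : mem.readLE (addr f + 136) 4 = 1) : stb_vorbis.eof mem f = 1 := by
  simp only [vfield] at h
  simp only [vacc, voff]
  show sint32 (mem.u32 (f + 136)) = 1
  rw [h]
  rfl

end Vorbis.Spec.skip

/-- `skip(f, n)` satisfies its contract: three check calls, the clamped step `stream += min(n, stream_end - stream)` (FIX 20), the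
store of `eof` when the end is reached. Straight-line code with two forward branches: four paths to the `ret`, one infeasible (pruned by the walker). -/
theorem Vorbis.Spec.Worked.skip_ok : Vorbis.Spec.skip.Statement := by
  intro Lay hLay μ hμ u₀ hcode hload8 hstore4 others frames Blk len u ret he hpre
  v_entry he
  obtain ⟨hrp, hn0⟩ := hpre
  have hsh := hrp.shadow
  have hsp := hsh.rsp
  -- where `*f` is: one arithmetic fact (inside the data space, off the text, off this function's stack)
  have hwhere := hrp.where_obj
  have hbits := hrp.bits
  have hobj := hrp.env.obj
  simp only [Vorbis.Off.sizeof.stb_vorbis] at hobj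
  obtain ⟨f, hf⟩ : ∃ f : Nat, (u.reg .rdi).toNat = f := ⟨_, rfl⟩
  rw [hf] at hwhere hbits hobj
  have hr : u.reg .rdi = addr f := eq_addr _ _ hf
  -- the two field loads, as facts (rewrite rules of every step)
  have r48 : u.mem.readLE (addr f + 48) 8 = stb_vorbis.stream u.mem f := by
    simp only [vfield, vacc, voff]
  have r64 : u.mem.readLE (addr f + 64) 8 = stb_vorbis.stream_end u.mem f := by
    simp only [vfield, vacc, voff]
  -- S1, S3 as numbers: `200000H ≤ stream ≤ stream_end ≤ 3FF000H`
  have hptr := hbits.ptr_range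
  have hrem := hbits.remaining_le
  -- `0 ≤ n`: the low half of esi is the number `n`
  obtain ⟨hx, hxn⟩ := Vorbis.Spec.skip.arg_nonneg (u.reg .rsi) hn0
  -- the walker's forms of the two compares and of the new stream pointer, as numbers
  have hA := Vorbis.Spec.skip.sext_toInt (Word.part .w32 (u.reg .rsi)) hx
  have hB := Vorbis.Spec.skip.sub_toInt (stb_vorbis.stream_end u.mem f) (stb_vorbis.stream u.mem f) (by omega) (by omega)
  have hC := Vorbis.Spec.skip.add_n_toNat (Word.part .w32 (u.reg .rsi)) (stb_vorbis.stream u.mem f) hx (by omega)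
  have hD := Vorbis.Spec.skip.add_rest_toNat (stb_vorbis.stream_end u.mem f) (stb_vorbis.stream u.mem f) (by omega)
    (by omega) (by omega)
  have hEe : (UInt64.ofNat (stb_vorbis.stream_end u.mem f)).toNat = stb_vorbis.stream_end u.mem f := by
    rw [UInt64.toNat_ofNat']
    omega
  have hsk := skipLen_cases ((Word.part .w32 (u.reg .rsi)).toNat : Int) (stb_vorbis.stream_end u.mem f)
    (stb_vorbis.stream u.mem f)
  u_walk hcode [hμ.vendor] span [Vorbis.L.textLo, Vorbis.L.textHi] side (v_side)
  · -- 0x104e36, line 1411: the check of the load of `f->stream_end`: inside `*f`; the pushes did not touch the shadow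
    have hun : ShadowUntouched u.mem s_104e36.mem := by v_untouched
    exact hobj.accSmall hsh.inv hun _ 8 (by decide) (by u_omega) (by u_omega)
  · -- 0x104e43, line 1411: the check of the load of `f->stream`
    have hun : ShadowUntouched u.mem s_104e43.mem := by v_untouched
    exact hobj.accSmall hsh.inv hun _ 8 (by decide) (by u_omega) (by u_omega)
  · -- 0x104e6f, line 1413: the check of the store of `f->eof` (path `n ≤ stream_end - stream`)
    have hun : ShadowUntouched u.mem s_104e6f.mem := by v_untouched
    exact hobj.accSmall hsh.inv hun _ 4 (by decide) (by u_omega) (by u_omega)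
  · -- 0x104e6f, line 1413: the check of the store of `f->eof` (path `n > stream_end - stream`)
    have hun : ShadowUntouched u.mem s_104e6f.mem := by v_untouched
    exact hobj.accSmall hsh.inv hun _ 4 (by decide) (by u_omega) (by u_omega)
  · -- the `ret` of the path `n ≤ stream_end - stream`, `stream + n < stream_end`: `eof` is not touched
    rw [hA, hB] at hbr_104e55
    rw [hC, hEe] at hbr_104e66
    refine ReachVia.done ?_
    v_returned
    show SkipPost Blk len (u.reg .rdi).toNat (argInt (u.reg .rsi)) u s_104e88
    rw [hf, hxn]
    have hE1 : Mem.EqOn (f + 56) (f + 136) u.mem s_104e88.mem := by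
      rw [w_mem]
      u_eqon
    have hE2 : Mem.EqOn (f + 140) (f + 1808) u.mem s_104e88.mem := by
      rw [w_mem]
      u_eqon
    have hE3 : Mem.EqOn (f + 136) (f + 140) u.mem s_104e88.mem := by
      rw [w_mem]
      u_eqon
    -- the new stream pointer
    have hrd : s_104e88.mem.readLE (addr f + 48) 8 = (Word.ofBV (BitVec.signExtend 64 (Word.part .w32 (u.reg .rsi))) +
        UInt64.ofNat (stb_vorbis.stream u.mem f)).toNat := by
      u_read
    rw [hC] at hrd
    have es : stb_vorbis.stream s_104e88.mem f = s_104e88.mem.readLE (addr f + 48) 8 := by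
      simp only [vfield, vacc, voff]
    rw [hrd] at es
    refine ⟨by v_untouched, Vorbis.Spec.skip.reader_after hbits hE1 hE2 _ es (by omega) (by omega), ?_, ?_, ?_⟩
    · rw [es]
      omega
    · intro hend
      rw [es] at hend
      omega
    · intro _
      simp only [vacc, voff]
      exact hE3.i32 _ (by omega) (by omega) (by omega)
  · -- the `ret` of the path `n ≤ stream_end - stream`, `stream + n ≥ stream_end`: `eof = 1`
    rw [hA, hB] at hbr_104e55
    rw [hC, hEe] at hbr_104e66
    refine ReachVia.done ?_
    v_returned
    show SkipPost Blk len (u.reg .rdi).toNat (argInt (u.reg .rsi)) u s_104e88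
    rw [hf, hxn]
    have hE1 : Mem.EqOn (f + 56) (f + 136) u.mem s_104e88.mem := by
      rw [w_mem]
      u_eqon
    have hE2 : Mem.EqOn (f + 140) (f + 1808) u.mem s_104e88.mem := by
      rw [w_mem]
      u_eqon
    have hrd : s_104e88.mem.readLE (addr f + 48) 8 = (Word.ofBV (BitVec.signExtend 64 (Word.part .w32 (u.reg .rsi))) +
        UInt64.ofNat (stb_vorbis.stream u.mem f)).toNat := by
      u_read
    rw [hC] at hrd
    have es : stb_vorbis.stream s_104e88.mem f = s_104e88.mem.readLE (addr f + 48) 8 := by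
      simp only [vfield, vacc, voff]
    rw [hrd] at es
    -- the stored `eof`
    have hrd4 : s_104e88.mem.readLE (addr f + 136) 4 = 1 := by
      u_read
    refine ⟨by v_untouched, Vorbis.Spec.skip.reader_after hbits hE1 hE2 _ es (by omega) (by omega), ?_, ?_, ?_⟩
    · rw [es]
      omega
    · intro _
      exact Vorbis.Spec.skip.eof_of_read hrd4
    · intro hlt
      rw [es] at hlt
      omega
  · -- the `ret` of the path `n > stream_end - stream`: `stream' = stream_end`, `eof = 1` (the arm `jb` taken was pruned by the
    -- walker: `hD` says `stream + (int) (stream_end - stream) = stream_end`)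
    rw [hA, hB] at hbr_104e55
    refine ReachVia.done ?_
    v_returned
    show SkipPost Blk len (u.reg .rdi).toNat (argInt (u.reg .rsi)) u s_104e88
    rw [hf, hxn]
    have hE1 : Mem.EqOn (f + 56) (f + 136) u.mem s_104e88.mem := by
      rw [w_mem]
      u_eqon
    have hE2 : Mem.EqOn (f + 140) (f + 1808) u.mem s_104e88.mem := by
      rw [w_mem]
      u_eqon
    have hrd : s_104e88.mem.readLE (addr f + 48) 8 = (Word.ofBV (BitVec.signExtend 64 (Word.part .w32
        (UInt64.ofNat (stb_vorbis.stream_end u.mem f) - UInt64.ofNat (stb_vorbis.stream u.mem f)))) +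
        UInt64.ofNat (stb_vorbis.stream u.mem f)).toNat := by
      u_read
    rw [hD] at hrd
    have es : stb_vorbis.stream s_104e88.mem f = s_104e88.mem.readLE (addr f + 48) 8 := by
      simp only [vfield, vacc, voff]
    rw [hrd] at es
    have hrd4 : s_104e88.mem.readLE (addr f + 136) 4 = 1 := by
      u_read
    refine ⟨by v_untouched, Vorbis.Spec.skip.reader_after hbits hE1 hE2 _ es (by omega) (by omega), ?_, ?_, ?_⟩
    · rw [es]
      omega
    · intro _
      exact Vorbis.Spec.skip.eof_of_read hrd4
    · intro hlt
      rw [es] at hlt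
      omega
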